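-- pv_equiv track=rewrite | github.com/stuart295/AdventOfCode | 2023/day_13/solve.py | solve_part_01
-- ===== SOURCE A (Python) =====
-- def count_reflections(pattern):
--     for i, line in enumerate(pattern):
--         if i == len(pattern) - 1:
--             break
--
--         s1 = len(pattern[:i + 1])
--         s2 = len(pattern[:i:-1])
--
--         if s1 <= s2:
--             if pattern[:i + 1] == pattern[i + s1:i:-1]:
--                 return s1
--         else:
--             if pattern[i + 1 - s2:i + 1] == pattern[:i:-1]:
--                 return s1
--
--     return 0
--
-- def rot(pattern):
--     return [[line[i] for line in pattern[::-1]] for i in range(len(pattern[0]))]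
--
-- def solve_part_01(patterns):
--     score = 0
--
--     for pattern in patterns:
--         # Horizontal
--         cur_score = count_reflections(pattern)
--         if cur_score:
--             score += cur_score * 100
--         else:
--             # Vertical line
--             rotated = rot(pattern)
--             cur_score = count_reflections(rotated)
--
--             assert cur_score > 0
--             score += cur_score
--
--     return score
-- ===== SOURCE B (Python) =====
-- def count_reflections(pattern):
--     n = len(pattern)
--     for i in range(n - 1):
--         a, b = i, i + 1
--         ok = True
--         while a >= 0 and b < n:
--             if pattern[a] != pattern[b]:
--                 ok = False
--                 break
--             a -= 1
--             b += 1
--         if ok: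
--             return i + 1
--     return 0
--
--
-- def rot(pattern):
--     return [[line[i] for line in pattern[::-1]] for i in range(len(pattern[0]))]
--
--
-- def score_pattern(pattern):
--     h = count_reflections(pattern)
--     if h:
--         return 100 * h
--     v = count_reflections(rot(pattern))
--     assert v > 0
--     return v
--
--
-- def solve_part_01(patterns):
--     return sum(score_pattern(p) for p in patterns)
-- ===== Notes on version B (the rewrite author's own statement) =====
-- stated objective: simpler
-- what changed: count_reflections' reversed-slice list comparisons (with the s1/s2 bound arithmetic) are replaced by a two-pointer outward scan from each candidate line with early break, and the score accumulator loop by a per-pattern score function summed over the patterns.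
import Mathlib
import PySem

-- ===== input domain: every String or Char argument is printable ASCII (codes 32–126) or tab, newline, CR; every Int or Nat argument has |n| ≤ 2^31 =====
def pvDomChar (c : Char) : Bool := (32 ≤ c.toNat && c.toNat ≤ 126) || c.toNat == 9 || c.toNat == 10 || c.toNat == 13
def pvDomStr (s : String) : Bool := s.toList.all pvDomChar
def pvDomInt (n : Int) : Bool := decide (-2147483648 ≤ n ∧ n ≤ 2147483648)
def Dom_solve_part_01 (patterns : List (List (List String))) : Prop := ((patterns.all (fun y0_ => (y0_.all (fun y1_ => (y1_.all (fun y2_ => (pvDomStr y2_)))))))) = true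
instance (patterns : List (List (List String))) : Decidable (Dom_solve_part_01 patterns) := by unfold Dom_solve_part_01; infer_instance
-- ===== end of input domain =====

-- B replaces count_reflections' reversed-slice comparisons by a two-pointer outward scan
-- with early break, and the accumulator loop of solve_part_01 by a per-pattern score summed
-- over the list (objective: simpler).

-- ===== PORT A =====
-- rot is textually identical in A and in B, so both ports share this helper.
-- pattern[0] and line[i] raise IndexError when out of range; the .getD defaults below are
-- reached only outside Pre_solve_part_01.  pattern[::-1] is slice? with step -1 (never none).
def pvRot (pattern : List (List String)) : List (List String) :=
  (PySem.List.pyRange 0 (((PySem.List.pyGet? pattern 0).getD []).length : Int) 1).map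
    (fun i => ((PySem.List.slice? pattern none none (-1)).getD []).map
      (fun line => (PySem.List.pyGet? line i).getD ""))

-- the for-loop of count_reflections over enumerate(pattern); 'break' and the final
-- 'return 0' both produce 0.  Slices with step -1 are slice? (step ≠ 0, so always some).
def pvCntA_go (p : List (List String)) : List (Int × List String) → Int
  | [] => 0
  | (i, _line) :: rest =>
    if i = (p.length : Int) - 1 then 0
    else
      let s1 : Int := (PySem.List.slice p none (some (i + 1))).length
      let s2 : Int := ((PySem.List.slice? p none (some i) (-1)).getD []).length
      if s1 ≤ s2 then
        if PySem.List.slice p none (some (i + 1)) = (PySem.List.slice? p (some (i + s1)) (some i) (-1)).getD []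
        then s1 else pvCntA_go p rest
      else
        if PySem.List.slice p (some (i + 1 - s2)) (some (i + 1)) = (PySem.List.slice? p none (some i) (-1)).getD []
        then s1 else pvCntA_go p rest

def pvCntA (pattern : List (List String)) : Int :=
  pvCntA_go pattern (PySem.List.enumerate pattern)

def solve_part_01 (patterns : List (List (List String))) : Int :=
  patterns.foldl
    (fun score pattern =>
      let cur_score := pvCntA pattern
      if cur_score ≠ 0 then score + cur_score * 100
      else
        -- assert cur_score > 0 : a failing assert raises; such inputs are outside Pre_
        score + pvCntA (pvRot pattern))
    0

-- ===== PORT B =====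
-- the while loop 'while a >= 0 and b < n: …' of B's count_reflections (early break on mismatch)
def pvInnerB (p : List (List String)) (a b : Int) : Bool :=
  if 0 ≤ a ∧ b < (p.length : Int) then
    if PySem.List.pyGet? p a = PySem.List.pyGet? p b then pvInnerB p (a - 1) (b + 1)
    else false
  else true
termination_by (a + 1).toNat
decreasing_by omega

-- 'for i in range(n - 1): …; return 0'
def pvCntB_go (p : List (List String)) : List Int → Int
  | [] => 0
  | i :: rest => if pvInnerB p i (i + 1) then i + 1 else pvCntB_go p rest

def pvCntB (pattern : List (List String)) : Int :=
  pvCntB_go pattern (PySem.List.pyRange 0 ((pattern.length : Int) - 1) 1)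

def pvScoreB (pattern : List (List String)) : Int :=
  let h := pvCntB pattern
  if h ≠ 0 then 100 * h
  else
    -- assert v > 0 : a failing assert raises; such inputs are outside Pre_
    pvCntB (pvRot pattern)

def solve_part_01_alt (patterns : List (List (List String))) : Int :=
  (patterns.map pvScoreB).sum

-- ===== PRECONDITION & SPEC =====
-- pattern q has a horizontal mirror line (what count_reflections detects)
def pvMirror (q : List (List String)) : Bool :=
  (List.range q.length).any fun i =>
    decide (i + 1 < q.length) &&
    ((List.range (i + 1)).all fun k =>
      !(decide (i + 1 + k < q.length)) || decide (q.getD (i - k) [] = q.getD (i + 1 + k) []))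

-- rot(pattern) indexes pattern[0] and line[i] for i < len(pattern[0]): this is what it needs
def pvRect (p : List (List String)) : Bool :=
  !p.isEmpty && p.all fun row => decide ((p.headD []).length ≤ row.length)

-- Pre_ excludes exactly the inputs where the Python A raises: a pattern with no horizontal
-- mirror must be non-empty with rows at least as long as row 0 (else rot raises IndexError)
-- and its rotation must have a mirror (else the assert fails).
def Pre_solve_part_01 (patterns : List (List (List String))) : Prop :=
  ∀ p ∈ patterns, pvMirror p = true ∨ (pvRect p = true ∧ pvMirror (pvRot p) = true)
instance (patterns : List (List (List String))) : Decidable (Pre_solve_part_01 patterns) := by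
  unfold Pre_solve_part_01; infer_instance

def pvWitness_solve_part_01 : List (List (List String)) := [[["#", "."], ["#", "."]]]

def Spec_solve_part_01 (patterns : List (List (List String))) (out : Int) : Prop := out = solve_part_01_alt patterns
instance (patterns : List (List (List String))) (out : Int) : Decidable (Spec_solve_part_01 patterns out) := by unfold Spec_solve_part_01; infer_instance

-- ===== CLAIM (what is proved, stated in full; the proofs are below) =====
def Claim_equal_solve_part_01 : Prop := ∀ (patterns : List (List (List String))), Dom_solve_part_01 patterns → Pre_solve_part_01 patterns → Spec_solve_part_01 patterns (solve_part_01 patterns)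

-- ===== LEMMAS AND PROOFS =====

-- the pointwise mirror condition at split line j (rows j-k and j+1+k agree)
def pvMirAt (p : List (List String)) (j : Nat) : Prop :=
  ∀ k : Nat, k ≤ j → j + 1 + k < p.length → p.getD (j - k) [] = p.getD (j + 1 + k) []

-- a step -1 slice enumerates indices s, s-1, …
theorem pv_filterMap_rev {α : Type} (xs : List α) (s : Nat) (hs : s < xs.length) :
    ∀ c : Nat, c ≤ s + 1 →
      List.filterMap (fun k : Nat => xs[((s : Int) + -(k : Int)).toNat]?) (List.range c)
        = ((xs.drop (s + 1 - c)).take c).reverse := by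
  intro c
  induction c with
  | zero => simp
  | succ c ih =>
    intro hc
    have hlt : s - c < xs.length := by omega
    have hidx : ((s : Int) + -(c : Int)).toNat = s - c := by omega
    rw [List.range_succ, List.filterMap_append, ih (by omega)]
    have hdrop : xs.drop (s - c) = xs[s - c] :: xs.drop (s - c + 1) :=
      List.drop_eq_getElem_cons hlt
    rw [show s + 1 - (c + 1) = s - c by omega, hdrop,
        show s - c + 1 = s + 1 - c by omega, List.take_succ_cons, List.reverse_cons]
    simp [hidx, List.getElem?_eq_getElem hlt]

theorem pv_slice?_rev {α : Type} (xs : List α) (a b : Nat) (hb : b ≤ a) (ha : a < xs.length) :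
    PySem.List.slice? xs (some (a : Int)) (some (b : Int)) (-1)
      = some (((xs.drop (b + 1)).take (a - b)).reverse) := by
  have h1 : ¬ ((-1 : Int) = 0) := by norm_num
  simp only [PySem.List.slice?, PySem.List.sliceIndices, h1, if_false]
  norm_num
  have hsa : (if (a : Int) < 0 then max ((a : Int) + xs.length) (-1) else min (a : Int) ((xs.length : Int) - 1)) = (a : Int) := by
    rw [if_neg (by omega)]; omega
  have hsb : (if (b : Int) < 0 then max ((b : Int) + xs.length) (-1) else min (b : Int) ((xs.length : Int) - 1)) = (b : Int) := by
    rw [if_neg (by omega)]; omega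
  rw [hsa, hsb]
  by_cases hab : b < a
  · rw [if_pos (by exact_mod_cast hab)]
    rw [show ((a : Int) - (b : Int)).toNat = a - b by omega]
    have h := pv_filterMap_rev xs a ha (a - b) (by omega)
    rw [show a + 1 - (a - b) = b + 1 by omega] at h
    exact h
  · rw [if_neg (by exact_mod_cast hab)]
    simp [show a - b = 0 by omega]

theorem pv_slice?_none_rev {α : Type} (xs : List α) (b : Nat) :
    PySem.List.slice? xs none (some (b : Int)) (-1) = some ((xs.drop (b + 1)).reverse) := by
  have h1 : ¬ ((-1 : Int) = 0) := by norm_num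
  simp only [PySem.List.slice?, PySem.List.sliceIndices, h1, if_false]
  norm_num
  have hsb : (if (b : Int) < 0 then max ((b : Int) + xs.length) (-1) else min (b : Int) ((xs.length : Int) - 1)) = min (b : Int) ((xs.length : Int) - 1) := by
    rw [if_neg (by omega)]
  rw [hsb]
  by_cases hlen : xs.length = 0
  · simp [hlen]
  by_cases hb : (b : Int) < (xs.length : Int) - 1
  · rw [show min (b : Int) ((xs.length : Int) - 1) = (b : Int) by omega,
        if_pos (by omega),
        show ((xs.length : Int) - 1 - (b : Int)).toNat = xs.length - 1 - b by omega,
        show ((xs.length : Int) - 1) = ((xs.length - 1 : Nat) : Int) by omega]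
    have h := pv_filterMap_rev xs (xs.length - 1) (by omega) (xs.length - 1 - b) (by omega)
    rw [show xs.length - 1 + 1 - (xs.length - 1 - b) = b + 1 by omega] at h
    rw [h, List.take_of_length_le (by simp; omega)]
  · rw [show min (b : Int) ((xs.length : Int) - 1) = ((xs.length : Int) - 1) by omega,
        if_neg (by omega)]
    simp [List.drop_eq_nil_of_le (show xs.length ≤ b + 1 by omega)]

-- slice equality at split j, with width m = min(j+1, n-1-j), is exactly pvMirAt
theorem pv_seg_iff (p : List (List String)) (j m : Nat) (hm1 : m ≤ j + 1)
    (hm2 : j + 1 + m ≤ p.length) (hm : m = min (j + 1) (p.length - 1 - j)) :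
    ((p.drop (j + 1 - m)).take m = ((p.drop (j + 1)).take m).reverse) ↔ pvMirAt p j := by
  have hlen1 : ((p.drop (j + 1 - m)).take m).length = m := by
    simp; omega
  have hlen2 : (((p.drop (j + 1)).take m).reverse).length = m := by
    simp; omega
  constructor
  · intro h k hk1 hk2
    have hkm : k < m := by omega
    have hjj : m - 1 - k < m := by omega
    have e := List.getElem_of_eq h (hlen1 ▸ hjj)
    rw [List.getElem_take, List.getElem_drop, List.getElem_reverse, List.getElem_take,
        List.getElem_drop] at e
    simp only [List.length_take, List.length_drop] at e
    rw [List.getD_eq_getElem p [] (by omega), List.getD_eq_getElem p [] (by omega)]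
    convert e using 2 <;> omega
  · intro h
    apply List.ext_getElem (by rw [hlen1, hlen2])
    intro jj h1 h2
    simp only [List.length_take, List.length_drop] at h1
    rw [List.getElem_take, List.getElem_drop, List.getElem_reverse, List.getElem_take,
        List.getElem_drop]
    have e := h (m - 1 - jj) (by omega) (by omega)
    rw [List.getD_eq_getElem p [] (by omega), List.getD_eq_getElem p [] (by omega)] at e
    simp only [List.length_take, List.length_drop]
    convert e using 2 <;> omega

theorem pv_innerB_iff (p : List (List String)) (j : Nat) (hj : j < p.length) :
    ∀ t : Nat, (pvInnerB p ((j : Int) - t) ((j : Int) + 1 + t) = true ↔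
      ∀ k : Nat, t ≤ k → k ≤ j → j + 1 + k < p.length → p.getD (j - k) [] = p.getD (j + 1 + k) []) := by
  have H : ∀ (f t : Nat), j + 1 - t ≤ f →
      (pvInnerB p ((j : Int) - t) ((j : Int) + 1 + t) = true ↔
        ∀ k : Nat, t ≤ k → k ≤ j → j + 1 + k < p.length → p.getD (j - k) [] = p.getD (j + 1 + k) []) := by
    intro f
    induction f with
    | zero =>
      intro t ht
      rw [pvInnerB, if_neg (by omega)]
      constructor
      · intro _ k hk1 hk2 _; omega
      · intro _; rfl
    | succ f ih =>
      intro t ht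
      by_cases hg : t ≤ j ∧ j + 1 + t < p.length
      · rw [pvInnerB, if_pos (by omega)]
        rw [show ((j : Int) - t) = ((j - t : Nat) : Int) by omega,
            show ((j : Int) + 1 + t) = ((j + 1 + t : Nat) : Int) by push_cast; ring]
        rw [PySem.List.pyGet?_natCast, PySem.List.pyGet?_natCast,
            List.getElem?_eq_getElem (show j - t < p.length by omega),
            List.getElem?_eq_getElem (show j + 1 + t < p.length from hg.2)]
        by_cases he : p[j - t] = p[j + 1 + t]
        · rw [if_pos (by rw [he])]
          rw [show ((j - t : Nat) : Int) - 1 = (j : Int) - ((t + 1 : Nat) : Int) by omega,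
              show ((j + 1 + t : Nat) : Int) + 1 = (j : Int) + 1 + ((t + 1 : Nat) : Int) by push_cast; ring,
              ih (t + 1) (by omega)]
          constructor
          · intro hrest k hk1 hk2 hk3
            rcases Nat.eq_or_lt_of_le hk1 with rfl | hlt
            · rw [List.getD_eq_getElem p [] (by omega), List.getD_eq_getElem p [] (by omega)]
              exact he
            · exact hrest k (by omega) hk2 hk3
          · intro hall k hk1 hk2 hk3; exact hall k (by omega) hk2 hk3
        · rw [if_neg (by simpa using he)]
          constructor
          · intro hfalse; simp at hfalse
          · intro hall
            exfalso; apply he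
            have e := hall t le_rfl hg.1 hg.2
            rw [List.getD_eq_getElem p [] (by omega), List.getD_eq_getElem p [] (by omega)] at e
            exact e
      · rw [pvInnerB, if_neg (by omega)]
        constructor
        · intro _ k hk1 hk2 hk3; exact (hg ⟨by omega, by omega⟩).elim
        · intro _; rfl
  exact fun t => H (j + 1) t (by omega)

theorem pv_go_eq (p : List (List String)) :
    ∀ (xs : List (List String)) (j : Nat), xs = p.drop j →
      pvCntA_go p (PySem.List.enumerate xs (j : Int))
        = pvCntB_go p (PySem.List.pyRange (j : Int) ((p.length : Int) - 1) 1) := by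
  intro xs
  induction xs with
  | nil =>
    intro j hx
    have hlen : p.length ≤ j := by
      have := congrArg List.length hx; simp at this; omega
    rw [PySem.List.pyRange_one_eq_nil (by omega)]
    simp [PySem.List.enumerate, pvCntA_go, pvCntB_go]
  | cons x xs' ih =>
    intro j hx
    have hj : j < p.length := by
      have := congrArg List.length hx; simp at this; omega
    rw [PySem.List.enumerate_cons]
    by_cases hlast : j = p.length - 1
    · simp only [pvCntA_go]
      rw [if_pos (by omega), PySem.List.pyRange_one_eq_nil (by omega)]
      simp only [pvCntB_go]
    · have hj1 : j + 1 < p.length := by omega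
      have hx' : xs' = p.drop (j + 1) := by
        rw [← List.tail_drop, ← hx]
        rfl
      -- the slice expressions of A at i = j
      have e1 : PySem.List.slice p none (some ((j : Int) + 1)) = p.take (j + 1) := by
        rw [show ((j : Int) + 1) = ((j + 1 : Nat) : Int) by push_cast; ring,
            PySem.List.slice_to_natCast]
      have e2 : (PySem.List.slice? p none (some (j : Int)) (-1)).getD [] = (p.drop (j + 1)).reverse := by
        rw [pv_slice?_none_rev]; rfl
      -- B's while loop at split j is the mirror condition
      have hB : (pvInnerB p (j : Int) ((j : Int) + 1) = true) ↔ pvMirAt p j := by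
        have h0 := pv_innerB_iff p j (by omega) 0
        rw [show ((j : Int) - (0 : Nat)) = (j : Int) by omega,
            show ((j : Int) + 1 + (0 : Nat)) = (j : Int) + 1 by omega] at h0
        rw [h0]
        exact ⟨fun h k hk1 hk2 => h k (Nat.zero_le k) hk1 hk2,
               fun h k _ hk1 hk2 => h k hk1 hk2⟩
      have hlen1 : (p.take (j + 1)).length = j + 1 := by simp; omega
      have hlen2 : ((p.drop (j + 1)).reverse).length = p.length - (j + 1) := by simp
      have hrec : pvCntA_go p (PySem.List.enumerate xs' ((j : Int) + 1))
          = pvCntB_go p (PySem.List.pyRange ((j : Int) + 1) ((p.length : Int) - 1) 1) := by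
        rw [show (j : Int) + 1 = ((j + 1 : Nat) : Int) by push_cast; ring]
        exact ih (j + 1) hx'
      rw [PySem.List.pyRange_one_cons (by omega)]
      simp only [pvCntA_go, pvCntB_go]
      rw [if_neg (by omega)]
      simp only [e1, e2, hlen1, hlen2]
      by_cases hs : 2 * j + 2 ≤ p.length
      · rw [if_pos (show ((j + 1 : Nat) : Int) ≤ ((p.length - (j + 1) : Nat) : Int) by omega)]
        have e3 : (PySem.List.slice? p (some ((j : Int) + ((j + 1 : Nat) : Int))) (some (j : Int)) (-1)).getD []
            = ((p.drop (j + 1)).take (j + 1)).reverse := by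
          rw [show ((j : Int) + ((j + 1 : Nat) : Int)) = ((2 * j + 1 : Nat) : Int) by push_cast; ring,
              pv_slice?_rev p (2 * j + 1) j (by omega) (by omega),
              show 2 * j + 1 - j = j + 1 by omega]
          rfl
        rw [e3]
        have hseg := pv_seg_iff p j (j + 1) (le_refl _) (by omega) (by omega)
        rw [show j + 1 - (j + 1) = 0 by omega, List.drop_zero] at hseg
        by_cases hmir : pvMirAt p j
        · rw [if_pos (hseg.mpr hmir), if_pos (hB.mpr hmir)]
          push_cast; ring
        · rw [if_neg (fun c => hmir (hseg.mp c)),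
              if_neg (show ¬ (pvInnerB p (j : Int) ((j : Int) + 1) = true) from fun c => hmir (hB.mp c))]
          exact hrec
      · rw [if_neg (show ¬ ((j + 1 : Nat) : Int) ≤ ((p.length - (j + 1) : Nat) : Int) by omega)]
        have e4 : PySem.List.slice p (some ((j : Int) + 1 - ((p.length - (j + 1) : Nat) : Int))) (some ((j : Int) + 1))
            = (p.drop (j + 1 - (p.length - 1 - j))).take (p.length - 1 - j) := by
          rw [show ((j : Int) + 1 - ((p.length - (j + 1) : Nat) : Int)) = ((2 * j + 2 - p.length : Nat) : Int) by omega,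
              show ((j : Int) + 1) = ((j + 1 : Nat) : Int) by push_cast; ring,
              PySem.List.slice_natCast,
              show (j + 1) - (2 * j + 2 - p.length) = p.length - 1 - j by omega,
              show 2 * j + 2 - p.length = j + 1 - (p.length - 1 - j) by omega]
        rw [e4]
        have hseg := pv_seg_iff p j (p.length - 1 - j) (by omega) (by omega) (by omega)
        rw [List.take_of_length_le (show ((p.drop (j + 1)).length ≤ p.length - 1 - j) by simp; omega)] at hseg
        by_cases hmir : pvMirAt p j
        · rw [if_pos (hseg.mpr hmir), if_pos (hB.mpr hmir)]
          push_cast; ring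
        · rw [if_neg (fun c => hmir (hseg.mp c)),
              if_neg (show ¬ (pvInnerB p (j : Int) ((j : Int) + 1) = true) from fun c => hmir (hB.mp c))]
          exact hrec

theorem pv_cnt_eq (p : List (List String)) : pvCntA p = pvCntB p := by
  unfold pvCntA pvCntB
  have h := pv_go_eq p p 0 (by simp)
  simpa using h

theorem pv_fold_eq (patterns : List (List (List String))) :
    ∀ acc : Int,
      patterns.foldl
        (fun score pattern =>
          let cur_score := pvCntA pattern
          if cur_score ≠ 0 then score + cur_score * 100
          else score + pvCntA (pvRot pattern)) acc
        = acc + (patterns.map pvScoreB).sum := by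
  induction patterns with
  | nil => simp [List.foldl]
  | cons p rest ih =>
      intro acc
      simp only [List.foldl, List.map, List.sum_cons]
      rw [ih]
      have h1 : pvCntA p = pvCntB p := pv_cnt_eq p
      have h2 : pvCntA (pvRot p) = pvCntB (pvRot p) := pv_cnt_eq (pvRot p)
      simp only [pvScoreB, h1, h2]
      by_cases h : pvCntB p ≠ 0 <;> simp [h] <;> ring

-- ===== VERDICT (by name: the statement is the Claim_ definition above) =====
theorem solve_part_01_spec : Claim_equal_solve_part_01 := by
  intro patterns _ _
  unfold Spec_solve_part_01 solve_part_01 solve_part_01_alt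
  rw [pv_fold_eq]
  ring
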